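-- pv_equiv track=rewrite | github.com/sophiafe/pulse-agents | src/util/agent_util.py | get_available_labs
-- ===== SOURCE A (Python) =====
-- from typing import Any, Dict, List, Optional, Set
--
-- def get_available_labs(
--     requested_labs: List[str], available_features: Set[str]
-- ) -> Set[str]:
--     """Get available requested labs from the data."""
--     available_labs = set()
--     for lab in requested_labs:
--         if any(feat.startswith(lab) for feat in available_features):
--             available_labs.add(lab)
--     return available_labs
-- ===== SOURCE B (Python) =====
-- def get_available_labs(requested_labs, available_features):
--     """Get available requested labs from the data."""
--     prefixes = set()
--     for feat in available_features:
--         for i in range(len(feat) + 1):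
--             prefixes.add(feat[:i])
--     return {lab for lab in requested_labs if lab in prefixes}
-- ===== Notes on version B (the rewrite author's own statement) =====
-- stated objective: faster
-- what changed: B precomputes the set of all prefixes of the available features once, so each lab becomes a single hash-set membership test instead of a startswith scan over every feature.
import Mathlib
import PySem

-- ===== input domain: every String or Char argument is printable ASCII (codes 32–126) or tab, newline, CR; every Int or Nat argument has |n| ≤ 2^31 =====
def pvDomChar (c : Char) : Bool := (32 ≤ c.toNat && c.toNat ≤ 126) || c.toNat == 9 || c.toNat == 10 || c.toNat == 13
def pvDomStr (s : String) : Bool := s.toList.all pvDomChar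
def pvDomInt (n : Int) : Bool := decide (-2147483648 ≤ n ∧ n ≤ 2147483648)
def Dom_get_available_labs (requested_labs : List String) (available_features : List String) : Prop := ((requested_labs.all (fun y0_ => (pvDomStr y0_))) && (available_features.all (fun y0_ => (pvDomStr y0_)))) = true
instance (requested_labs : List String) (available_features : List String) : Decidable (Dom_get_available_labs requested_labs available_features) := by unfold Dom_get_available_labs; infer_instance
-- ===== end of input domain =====

-- B builds the set of all prefixes of the available features once and tests each lab by membership,
-- replacing A's per-lab scan over all features (objective: faster; per-lab work becomes one lookup).


-- ===== PORT A =====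
def get_available_labs (requested_labs : List String) (available_features : List String) : List String :=
  requested_labs.foldl
    (fun available_labs lab =>
      if available_features.any (fun feat => PySem.Str.startswith feat lab) then
        PySem.Set.add available_labs lab
      else available_labs)
    PySem.Set.empty

-- ===== PORT B =====
def get_available_labs_alt (requested_labs : List String) (available_features : List String) : List String :=
  let prefixes : PySem.Set String :=
    available_features.foldl
      (fun acc feat =>
        (PySem.List.pyRange 0 (PySem.Str.len feat + 1) 1).foldl
          (fun acc2 i => PySem.Set.add acc2 (PySem.Str.slice feat none (some i))) acc)
      PySem.Set.empty
  requested_labs.foldl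
    (fun acc lab =>
      if PySem.Set.contains prefixes lab then PySem.Set.add acc lab else acc)
    PySem.Set.empty

-- ===== PRECONDITION & SPEC =====
def Spec_get_available_labs (requested_labs : List String) (available_features : List String) (out : List String) : Prop := out = get_available_labs_alt requested_labs available_features
instance (requested_labs : List String) (available_features : List String) (out : List String) : Decidable (Spec_get_available_labs requested_labs available_features out) := by unfold Spec_get_available_labs; infer_instance

-- ===== CLAIM (what is proved, stated in full; the proofs are below) =====
def Claim_equal_get_available_labs : Prop := ∀ (requested_labs : List String) (available_features : List String), Dom_get_available_labs requested_labs available_features → Spec_get_available_labs requested_labs available_features (get_available_labs requested_labs available_features)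

-- ===== LEMMAS AND PROOFS =====

-- membership in a fold that only adds g i for each i of the list
theorem mem_foldl_add {α β : Type} [BEq α] [LawfulBEq α] (l : List β) (g : β → α)
    (acc : PySem.Set α) (x : α) :
    x ∈ l.foldl (fun a i => PySem.Set.add a (g i)) acc ↔ x ∈ acc ∨ ∃ i ∈ l, x = g i := by
  induction l generalizing acc with
  | nil => simp
  | cons b bs ih =>
      simp only [List.foldl_cons, ih, PySem.Set.mem_add, List.mem_cons]
      constructor
      · rintro (⟨h | h⟩ | ⟨i, hi, rfl⟩)
        · exact Or.inl h
        · exact Or.inr ⟨b, Or.inl rfl, h⟩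
        · exact Or.inr ⟨i, Or.inr hi, rfl⟩
      · rintro (h | ⟨i, (rfl | hi), rfl⟩)
        · exact Or.inl (Or.inl h)
        · exact Or.inl (Or.inr rfl)
        · exact Or.inr ⟨i, hi, rfl⟩

-- a string is a member of the prefix-range of feat iff feat starts with it
theorem mem_prefix_range (feat lab : String) :
    (∃ i ∈ PySem.List.pyRange 0 (PySem.Str.len feat + 1) 1,
        lab = PySem.Str.slice feat none (some i)) ↔
      PySem.Str.startswith feat lab = true := by
  rw [PySem.Str.startswith_eq, PySem.Chars.startswith_iff]
  constructor
  · rintro ⟨i, hi, rfl⟩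
    rw [PySem.List.mem_pyRange_one] at hi
    simp only [PySem.Str.slice, String.toList_ofList, PySem.Chars.slice_eq_listSlice]
    rw [PySem.List.slice_to feat.toList hi.1]
    exact List.take_prefix _ _
  · intro h
    refine ⟨(lab.toList.length : Int), ?_, ?_⟩
    · rw [PySem.List.mem_pyRange_one]
      have hle := h.length_le
      simp only [PySem.Str.len]
      omega
    · have hl : lab.toList = feat.toList.take lab.toList.length :=
        List.prefix_iff_eq_take.mp h
      simp only [PySem.Str.slice, PySem.Chars.slice_eq_listSlice]
      rw [PySem.List.slice_to feat.toList (by positivity), Int.toNat_natCast, ← hl,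
        String.ofList_toList]

-- membership in the nested prefix fold
theorem mem_prefix_fold (available_features : List String) (acc : PySem.Set String) (lab : String) :
    lab ∈ available_features.foldl
        (fun acc feat =>
          (PySem.List.pyRange 0 (PySem.Str.len feat + 1) 1).foldl
            (fun acc2 i => PySem.Set.add acc2 (PySem.Str.slice feat none (some i))) acc) acc ↔
      lab ∈ acc ∨ ∃ feat ∈ available_features,
        ∃ i ∈ PySem.List.pyRange 0 (PySem.Str.len feat + 1) 1,
          lab = PySem.Str.slice feat none (some i) := by
  induction available_features generalizing acc with
  | nil => simp
  | cons f fs ih =>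
      simp only [List.foldl_cons, ih, mem_foldl_add, List.mem_cons]
      constructor
      · rintro ((h | h) | ⟨feat, hf, hp⟩)
        · exact Or.inl h
        · exact Or.inr ⟨f, Or.inl rfl, h⟩
        · exact Or.inr ⟨feat, Or.inr hf, hp⟩
      · rintro (h | ⟨feat, (rfl | hf), hp⟩)
        · exact Or.inl (Or.inl h)
        · exact Or.inl (Or.inr hp)
        · exact Or.inr ⟨feat, hf, hp⟩

-- the prefix set contains lab iff some feature starts with lab
theorem contains_prefix_set (available_features : List String) (lab : String) :
    PySem.Set.contains
      (available_features.foldl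
        (fun acc feat =>
          (PySem.List.pyRange 0 (PySem.Str.len feat + 1) 1).foldl
            (fun acc2 i => PySem.Set.add acc2 (PySem.Str.slice feat none (some i))) acc)
        PySem.Set.empty) lab
      = available_features.any (fun feat => PySem.Str.startswith feat lab) := by
  rw [Bool.eq_iff_iff, PySem.Set.contains_iff, List.any_eq_true, mem_prefix_fold]
  simp only [PySem.Set.empty, List.not_mem_nil, false_or]
  constructor
  · rintro ⟨feat, hf, hp⟩
    exact ⟨feat, hf, (mem_prefix_range feat lab).mp hp⟩
  · rintro ⟨feat, hf, hs⟩
    exact ⟨feat, hf, (mem_prefix_range feat lab).mpr hs⟩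

-- ===== VERDICT (by name: the statement is the Claim_ definition above) =====
theorem get_available_labs_spec : Claim_equal_get_available_labs := by
  intro requested_labs available_features _
  unfold Spec_get_available_labs get_available_labs get_available_labs_alt
  simp only [contains_prefix_set]
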